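-- pv_equiv track=rewrite | github.com/nassimhemdane/AOSE | ProsumerAgent.py | intelligent_purchase
-- ===== SOURCE A (Python) =====
-- import math
--
-- def intelligent_purchase(optimalP,job):
--     buy=[]
--     j_list=[]
--     for i in range(job[1]):
--         actmin=math.inf
--         jactmin=0
--         act=(0,0)
--         took = False
--         for j in range(len(optimalP)):
--             if(job[0][j]==1 and (j not in j_list)):
--                     if(optimalP[j][1]<actmin and optimalP[j][1]>0 ):
--                         actmin=optimalP[j][1]
--                         act = optimalP[j]
--                         took = True
--                         jactmin=j
--         if (took):
--             buy.append((jactmin, act[0]))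
--             j_list.append(jactmin)
--     return buy
-- ===== SOURCE B (Python) =====
-- def intelligent_purchase(optimalP, job):
--     k = job[1]
--     if k <= 0:
--         return []
--     eligible = sorted((optimalP[j][1], j, optimalP[j][0])
--                       for j in range(len(optimalP))
--                       if job[0][j] == 1 and optimalP[j][1] > 0)
--     return [(j, p) for (_, j, p) in eligible[:k]]
-- ===== Notes on version B (the rewrite author's own statement) =====
-- stated objective: simpler
-- what changed: Replaces k repeated minimum-scans with exclusion lists by building the eligible (value, index, payload) triples once, sorting them ascending (tuple order reproduces A's value-then-index tie-break) and taking the first k.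
import Mathlib
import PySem

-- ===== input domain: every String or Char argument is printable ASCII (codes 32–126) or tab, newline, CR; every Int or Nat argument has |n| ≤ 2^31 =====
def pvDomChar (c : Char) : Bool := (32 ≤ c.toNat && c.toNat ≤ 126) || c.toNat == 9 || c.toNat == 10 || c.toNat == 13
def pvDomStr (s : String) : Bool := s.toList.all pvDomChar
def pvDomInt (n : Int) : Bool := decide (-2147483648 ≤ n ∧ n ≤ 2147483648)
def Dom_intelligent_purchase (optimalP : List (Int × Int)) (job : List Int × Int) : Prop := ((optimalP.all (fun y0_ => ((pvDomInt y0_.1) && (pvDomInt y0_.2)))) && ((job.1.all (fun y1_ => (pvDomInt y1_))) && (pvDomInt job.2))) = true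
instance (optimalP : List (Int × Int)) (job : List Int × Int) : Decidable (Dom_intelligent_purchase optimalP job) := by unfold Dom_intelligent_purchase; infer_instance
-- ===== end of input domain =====

-- B replaces A's k repeated minimum-scans (with an exclusion list) by building the eligible
-- (value, index, payload) triples once, sorting them and taking the first k (objective: simpler).

-- ===== PORT A =====
-- body of A's inner loop (one scan step: keep the strictly cheaper eligible index)
def pvStepA (optimalP : List (Int × Int)) (job0 : List Int) (jl : List Int)
    (s : Option Int × Int × (Int × Int) × Bool) (j : Int) :
    Option Int × Int × (Int × Int) × Bool :=
  if PySem.List.pyGetD job0 j 0 == 1 && !jl.contains j then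
    if (match s.1 with
        | none => true
        | some m => decide ((PySem.List.pyGetD optimalP j (0, 0)).2 < m)) &&
        decide ((PySem.List.pyGetD optimalP j (0, 0)).2 > 0) then
      (some (PySem.List.pyGetD optimalP j (0, 0)).2, j, PySem.List.pyGetD optimalP j (0, 0), true)
    else s
  else s

-- inner loop of A: one scan for the cheapest eligible index not yet in jl
def pvInnerA (optimalP : List (Int × Int)) (job0 : List Int) (jl : List Int) :
    Option Int × Int × (Int × Int) × Bool :=
  (PySem.List.pyRange 0 (optimalP.length : Int) 1).foldl (pvStepA optimalP job0 jl)
    (none, 0, (0, 0), false)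

-- body of A's outer loop: append the found minimum to buy and its index to j_list
def pvBodyA (optimalP : List (Int × Int)) (job0 : List Int)
    (st : List (Int × Int) × List Int) : List (Int × Int) × List Int :=
  let inner := pvInnerA optimalP job0 st.2
  if inner.2.2.2 then (st.1 ++ [(inner.2.1, inner.2.2.1.1)], st.2 ++ [inner.2.1]) else st

def intelligent_purchase (optimalP : List (Int × Int)) (job : List Int × Int) : List (Int × Int) :=
  ((PySem.List.pyRange 0 job.2 1).foldl (fun st _i => pvBodyA optimalP job.1 st) ([], [])).1

-- ===== PORT B =====
def intelligent_purchase_alt (optimalP : List (Int × Int)) (job : List Int × Int) : List (Int × Int) :=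
  let k := job.2
  if k ≤ 0 then []
  else
    let eligible := ((PySem.List.pyRange 0 (optimalP.length : Int) 1).filter
        (fun j => PySem.List.pyGetD job.1 j 0 == 1 &&
          decide (0 < (PySem.List.pyGetD optimalP j (0, 0)).2))).map
      (fun j => ((PySem.List.pyGetD optimalP j (0, 0)).2, j, (PySem.List.pyGetD optimalP j (0, 0)).1))
    -- sorted(..) on the triples: tuple comparison; the (value, index) prefix is always distinct
    -- (indices come from range), so the payload component is never compared — sorted2 is exact here
    let s := PySem.List.sorted2 eligible (fun t => t.1) (fun t => t.2.1)
    (PySem.List.slice s none (some k)).map (fun t => (t.2.1, t.2.2))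

-- ===== PRECONDITION & SPEC =====
-- Pre_ excludes exactly the inputs where A raises IndexError (job[0][j] read past the end of
-- job[0] while scanning range(len(optimalP)), which happens iff job[1] > 0 and
-- len(optimalP) > len(job[0])); B raises there too.
def Pre_intelligent_purchase (optimalP : List (Int × Int)) (job : List Int × Int) : Prop :=
  job.2 ≤ 0 ∨ optimalP.length ≤ job.1.length
instance (optimalP : List (Int × Int)) (job : List Int × Int) :
    Decidable (Pre_intelligent_purchase optimalP job) := by
  unfold Pre_intelligent_purchase; infer_instance

def pvWitness_intelligent_purchase : (List (Int × Int)) × (List Int × Int) :=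
  ([(5, 2), (3, 1)], ([1, 1], 1))

def Spec_intelligent_purchase (optimalP : List (Int × Int)) (job : List Int × Int) (out : List (Int × Int)) : Prop := out = intelligent_purchase_alt optimalP job
instance (optimalP : List (Int × Int)) (job : List Int × Int) (out : List (Int × Int)) : Decidable (Spec_intelligent_purchase optimalP job out) := by unfold Spec_intelligent_purchase; infer_instance

-- ===== CLAIM (what is proved, stated in full; the proofs are below) =====
def Claim_equal_intelligent_purchase : Prop := ∀ (optimalP : List (Int × Int)) (job : List Int × Int), Dom_intelligent_purchase optimalP job → Pre_intelligent_purchase optimalP job → Spec_intelligent_purchase optimalP job (intelligent_purchase optimalP job)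

-- ===== LEMMAS AND PROOFS =====

-- value, payload and eligible triple of index j
def pvV (optimalP : List (Int × Int)) (j : Int) : Int := (PySem.List.pyGetD optimalP j (0, 0)).2
def pvTrip (optimalP : List (Int × Int)) (j : Int) : Int × Int × Int :=
  ((PySem.List.pyGetD optimalP j (0, 0)).2, j, (PySem.List.pyGetD optimalP j (0, 0)).1)
def pvKey (t : Int × Int × Int) : Lex (Int × Int) := toLex (t.1, t.2.1)
def pvProj (t : Int × Int × Int) : Int × Int := (t.2.1, t.2.2)

def pvElig (optimalP : List (Int × Int)) (job0 : List Int) : List (Int × Int × Int) :=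
  ((PySem.List.pyRange 0 (optimalP.length : Int) 1).filter
      (fun j => PySem.List.pyGetD job0 j 0 == 1 && decide (0 < pvV optimalP j))).map
    (pvTrip optimalP)

def pvT (optimalP : List (Int × Int)) (job0 : List Int) : List (Int × Int × Int) :=
  PySem.List.sorted (pvElig optimalP job0) pvKey false

def pvBuyOf (optimalP : List (Int × Int)) (job0 : List Int) (m : Nat) : List (Int × Int) :=
  ((pvT optimalP job0).take m).map pvProj
def pvJlOf (optimalP : List (Int × Int)) (job0 : List Int) (m : Nat) : List Int :=
  ((pvT optimalP job0).take m).map (fun t => t.2.1)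

def pvCand (optimalP : List (Int × Int)) (job0 : List Int) (jl : List Int) (j : Int) : Bool :=
  (PySem.List.pyGetD job0 j 0 == 1) && !jl.contains j && decide (0 < pvV optimalP j)
def pvG (optimalP : List (Int × Int)) (t : Int × Int × Int) (j : Int) : Int × Int × Int :=
  if pvV optimalP j < t.1 then pvTrip optimalP j else t
def pvStOf (t : Int × Int × Int) : Option Int × Int × (Int × Int) × Bool :=
  (some t.1, t.2.1, (t.2.2, t.1), true)

-- the comparison sorted2 uses is the lexicographic (value, index) comparison
theorem pv_before_eq (a b : Int × Int × Int) :
    (decide (a.1 < b.1) || !decide (b.1 < a.1) && decide (a.2.1 < b.2.1)) =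
      decide (pvKey a < pvKey b) := by
  simp only [pvKey, Prod.Lex.lt_iff]
  by_cases h1 : a.1 < b.1 <;> by_cases h2 : b.1 < a.1 <;> by_cases h3 : a.2.1 < b.2.1 <;>
    simp [h1, h2, h3] <;> omega

theorem pv_sorted2_eq (xs : List (Int × Int × Int)) :
    PySem.List.sorted2 xs (fun t => t.1) (fun t => t.2.1) =
      PySem.List.sorted xs pvKey false := by
  rw [PySem.List.sorted_eq_foldl_insertBy]
  show List.foldl (fun acc x => PySem.List.insertBy
      (fun (a b : Int × Int × Int) =>
        (decide (a.1 < b.1) || !decide (b.1 < a.1) && decide (a.2.1 < b.2.1))) x acc) [] xs = _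
  have h : (fun (a b : Int × Int × Int) =>
      (decide (a.1 < b.1) || !decide (b.1 < a.1) && decide (a.2.1 < b.2.1))) =
      fun a b => decide (pvKey a < pvKey b) := by
    funext a b; exact pv_before_eq a b
  rw [h]

theorem pv_trip_self {optimalP : List (Int × Int)} {job0 : List Int}
    {t : Int × Int × Int} (h : t ∈ pvElig optimalP job0) : t = pvTrip optimalP t.2.1 := by
  rcases List.mem_map.mp h with ⟨j, _, rfl⟩; rfl

theorem pv_mem_T_trip {optimalP : List (Int × Int)} {job0 : List Int}
    {t : Int × Int × Int} (h : t ∈ pvT optimalP job0) : t = pvTrip optimalP t.2.1 :=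
  pv_trip_self ((PySem.List.sorted_perm _ _ _).mem_iff.mp h)

theorem pv_nodup_elig (optimalP : List (Int × Int)) (job0 : List Int) :
    (pvElig optimalP job0).Nodup := by
  apply List.Nodup.map
  · intro a b hab
    have : (pvTrip optimalP a).2.1 = (pvTrip optimalP b).2.1 := by rw [hab]
    simpa [pvTrip] using this
  · exact (PySem.List.nodup_pyRange_one 0 (optimalP.length : Int)).filter _

theorem pv_nodup_T (optimalP : List (Int × Int)) (job0 : List Int) :
    (pvT optimalP job0).Nodup :=
  ((PySem.List.sorted_perm _ _ _).nodup_iff).mpr (pv_nodup_elig optimalP job0)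

-- the two shapes of one inner step
theorem pvStepA_best (optimalP : List (Int × Int)) (job0 : List Int) (jl : List Int)
    (t : Int × Int × Int) (j : Int) :
    pvStepA optimalP job0 jl (pvStOf t) j =
      pvStOf (if pvCand optimalP job0 jl j = true then pvG optimalP t j else t) := by
  unfold pvStepA pvStOf pvCand pvG pvV pvTrip
  simp only [List.contains_eq_mem]
  by_cases h1 : PySem.List.pyGetD job0 j 0 = 1 <;>
    by_cases h2 : j ∈ jl <;>
    by_cases h3 : (PySem.List.pyGetD optimalP j (0, 0)).2 < t.1 <;>
    by_cases h4 : (0:Int) < (PySem.List.pyGetD optimalP j (0, 0)).2 <;>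
    simp [h1, h2, h3, h4]

theorem pvStepA_init (optimalP : List (Int × Int)) (job0 : List Int) (jl : List Int) (j : Int) :
    pvStepA optimalP job0 jl (none, 0, (0, 0), false) j =
      if pvCand optimalP job0 jl j = true then pvStOf (pvTrip optimalP j)
      else (none, 0, (0, 0), false) := by
  unfold pvStepA pvStOf pvCand pvV pvTrip
  simp only [List.contains_eq_mem]
  by_cases h1 : PySem.List.pyGetD job0 j 0 = 1 <;>
    by_cases h2 : j ∈ jl <;>
    by_cases h4 : (0:Int) < (PySem.List.pyGetD optimalP j (0, 0)).2 <;>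
    simp [h1, h2, h4]

-- step from a "best so far" state
theorem pv_inner_from_best (optimalP : List (Int × Int)) (job0 : List Int) (jl : List Int)
    (L : List Int) (t : Int × Int × Int) :
    L.foldl (pvStepA optimalP job0 jl) (pvStOf t) =
      pvStOf ((L.filter (pvCand optimalP job0 jl)).foldl (pvG optimalP) t) := by
  induction L generalizing t with
  | nil => rfl
  | cons j L ih =>
    rw [List.foldl_cons, pvStepA_best]
    by_cases hc : pvCand optimalP job0 jl j = true
    · rw [if_pos hc, List.filter_cons_of_pos hc]
      simp only [List.foldl_cons]
      exact ih _
    · rw [if_neg hc, List.filter_cons_of_neg (by simpa using hc)]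
      exact ih t

-- the whole inner scan, from the initial state
theorem pv_inner_eq (optimalP : List (Int × Int)) (job0 : List Int) (jl : List Int)
    (L : List Int) :
    L.foldl (pvStepA optimalP job0 jl) (none, 0, (0, 0), false) =
      (match L.filter (pvCand optimalP job0 jl) with
        | [] => (none, 0, (0, 0), false)
        | j :: cs => pvStOf (cs.foldl (pvG optimalP) (pvTrip optimalP j))) := by
  induction L with
  | nil => rfl
  | cons j L ih =>
    rw [List.foldl_cons, pvStepA_init]
    by_cases hc : pvCand optimalP job0 jl j = true
    · rw [if_pos hc, List.filter_cons_of_pos hc, pv_inner_from_best]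
    · rw [if_neg hc, ih, List.filter_cons_of_neg (by simpa using hc)]

theorem pv_key_le_iff (r q : Int × Int × Int) :
    pvKey r ≤ pvKey q ↔ (r.1 < q.1 ∨ (r.1 = q.1 ∧ r.2.1 ≤ q.2.1)) := by
  simp [pvKey, Prod.Lex.le_iff]

-- the running-minimum fold picks the lexicographic (value, index) minimum when scanned in
-- increasing index order
theorem pv_g_min (optimalP : List (Int × Int)) (cs : List Int) :
    ∀ t : Int × Int × Int, cs.Pairwise (· < ·) → (∀ x ∈ cs, t.2.1 < x) →
      ((cs.foldl (pvG optimalP) t = t ∨ cs.foldl (pvG optimalP) t ∈ cs.map (pvTrip optimalP)) ∧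
        ∀ q ∈ t :: cs.map (pvTrip optimalP), pvKey (cs.foldl (pvG optimalP) t) ≤ pvKey q) := by
  induction cs with
  | nil => intro t _ _; exact ⟨Or.inl rfl, by simp⟩
  | cons j cs ih =>
    intro t hpw hlt
    have hj : t.2.1 < j := hlt j (by simp)
    have hpw' := (List.pairwise_cons.mp hpw)
    set t' := pvG optimalP t j with ht'
    have hlt' : ∀ x ∈ cs, t'.2.1 < x := by
      intro x hx
      rw [ht']; unfold pvG
      split
      · simpa [pvTrip] using hpw'.1 x hx
      · exact hlt x (by simp [hx])
    obtain ⟨hmem, hmin⟩ := ih t' hpw'.2 hlt'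
    have h1 : pvKey t' ≤ pvKey t := by
      rw [ht']; unfold pvG
      split
      · rename_i hlt2
        rw [pv_key_le_iff]
        simp only [pvTrip, pvV] at hlt2 ⊢
        omega
      · exact le_refl _
    have h2 : pvKey t' ≤ pvKey (pvTrip optimalP j) := by
      rw [ht']; unfold pvG
      split
      · exact le_refl _
      · rename_i hnot
        rw [pv_key_le_iff]
        simp only [pvTrip, pvV] at hnot ⊢
        omega
    have hfold : (j :: cs).foldl (pvG optimalP) t = cs.foldl (pvG optimalP) t' := by
      simp [ht']
    refine ⟨?_, ?_⟩
    · rw [hfold]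
      rcases hmem with h | h
      · rw [h, ht']; unfold pvG
        split
        · right; simp
        · left; rfl
      · right; simp only [List.map_cons, List.mem_cons]; right; exact h
    · intro q hq
      rw [hfold]
      rcases List.mem_cons.mp hq with rfl | hq'
      · exact le_trans (hmin t' (by simp)) h1
      · rw [List.map_cons] at hq'
        rcases List.mem_cons.mp hq' with rfl | hq''
        · exact le_trans (hmin t' (by simp)) h2
        · exact hmin q (by simp [hq''])

-- candidate indices at stage m are exactly the indices of the not-yet-taken sorted triples
theorem pv_cands_perm (optimalP : List (Int × Int)) (job0 : List Int)
    (hlen : optimalP.length ≤ job0.length) (m : Nat) (hm : m ≤ (pvT optimalP job0).length) :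
    (((PySem.List.pyRange 0 (optimalP.length : Int) 1).filter
        (pvCand optimalP job0 (pvJlOf optimalP job0 m))).map (pvTrip optimalP)).Perm
      ((pvT optimalP job0).drop m) := by
  have hTnd := pv_nodup_T optimalP job0
  have hnd1 : (((PySem.List.pyRange 0 (optimalP.length : Int) 1).filter
      (pvCand optimalP job0 (pvJlOf optimalP job0 m))).map (pvTrip optimalP)).Nodup := by
    apply List.Nodup.map
    · intro a b hab
      have : (pvTrip optimalP a).2.1 = (pvTrip optimalP b).2.1 := by rw [hab]
      simpa [pvTrip] using this
    · exact (PySem.List.nodup_pyRange_one 0 (optimalP.length : Int)).filter _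
  have hnd2 : ((pvT optimalP job0).drop m).Nodup :=
    hTnd.sublist (List.drop_sublist m _)
  rw [List.perm_ext_iff_of_nodup hnd1 hnd2]
  intro x
  have hdisj : ∀ a ∈ (pvT optimalP job0).take m, a ∉ (pvT optimalP job0).drop m := by
    have hnd := hTnd
    rw [← List.take_append_drop m (pvT optimalP job0), List.nodup_append] at hnd
    intro a ha hb
    exact hnd.2.2 a ha a hb rfl
  have hmemT : ∀ y, y ∈ pvT optimalP job0 ↔ y ∈ pvElig optimalP job0 := by
    intro y; exact (PySem.List.sorted_perm _ _ _).mem_iff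
  constructor
  · intro hx
    rcases List.mem_map.mp hx with ⟨j, hj, rfl⟩
    rcases List.mem_filter.mp hj with ⟨hjr, hjc⟩
    simp only [pvCand, Bool.and_eq_true, Bool.not_eq_true', decide_eq_true_eq] at hjc
    have hxe : pvTrip optimalP j ∈ pvElig optimalP job0 := by
      apply List.mem_map.mpr
      exact ⟨j, List.mem_filter.mpr ⟨hjr, by simp [hjc.1.1, hjc.2]⟩, rfl⟩
    have hxT : pvTrip optimalP j ∈ pvT optimalP job0 := (hmemT _).mpr hxe
    have hnotin : pvTrip optimalP j ∉ (pvT optimalP job0).take m := by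
      intro hcon
      have : j ∈ pvJlOf optimalP job0 m := by
        apply List.mem_map.mpr
        exact ⟨pvTrip optimalP j, hcon, rfl⟩
      have := hjc.1.2
      simp only [List.contains_eq_mem, decide_eq_false_iff_not] at this
      exact this ‹j ∈ pvJlOf optimalP job0 m›
    have : pvTrip optimalP j ∈ (pvT optimalP job0).take m ++ (pvT optimalP job0).drop m := by
      rw [List.take_append_drop]; exact hxT
    rcases List.mem_append.mp this with h | h
    · exact absurd h hnotin
    · exact h
  · intro hx
    have hxT : x ∈ pvT optimalP job0 := by
      rw [← List.take_append_drop m (pvT optimalP job0)]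
      exact List.mem_append.mpr (Or.inr hx)
    have hxe : x ∈ pvElig optimalP job0 := (hmemT _).mp hxT
    rcases List.mem_map.mp hxe with ⟨j, hj, rfl⟩
    rcases List.mem_filter.mp hj with ⟨hjr, hjc⟩
    simp only [Bool.and_eq_true, beq_iff_eq, decide_eq_true_eq] at hjc
    apply List.mem_map.mpr
    refine ⟨j, List.mem_filter.mpr ⟨hjr, ?_⟩, rfl⟩
    simp only [pvCand, Bool.and_eq_true, Bool.not_eq_true', decide_eq_true_eq]
    refine ⟨⟨by simp [hjc.1], ?_⟩, hjc.2⟩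
    simp only [List.contains_eq_mem, decide_eq_false_iff_not]
    intro hcon
    rcases List.mem_map.mp hcon with ⟨u, hu, hu2⟩
    have huT : u ∈ pvT optimalP job0 := List.mem_of_mem_take hu
    have := pv_mem_T_trip huT
    rw [hu2] at this
    rw [this] at hu
    exact hdisj _ hu hx

-- the inner scan at stage m finds exactly the (m+1)-st sorted triple
theorem pv_inner_char (optimalP : List (Int × Int)) (job0 : List Int)
    (hlen : optimalP.length ≤ job0.length) (m : Nat) (hm : m ≤ (pvT optimalP job0).length) :
    pvInnerA optimalP job0 (pvJlOf optimalP job0 m) =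
      if h : m < (pvT optimalP job0).length then pvStOf ((pvT optimalP job0)[m])
      else (none, 0, (0, 0), false) := by
  have hperm := pv_cands_perm optimalP job0 hlen m hm
  unfold pvInnerA
  rw [pv_inner_eq]
  by_cases h : m < (pvT optimalP job0).length
  · rw [dif_pos h]
    have hdropne : (pvT optimalP job0).drop m ≠ [] := by
      intro hcon
      have := List.length_drop (l := pvT optimalP job0) (i := m)
      rw [hcon] at this
      simp at this
      omega
    have hcsne : ((PySem.List.pyRange 0 (optimalP.length : Int) 1).filter
        (pvCand optimalP job0 (pvJlOf optimalP job0 m))) ≠ [] := by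
      intro hcon
      rw [hcon] at hperm
      simp only [List.map_nil] at hperm
      exact hdropne hperm.symm.eq_nil
    obtain ⟨j1, cs, hcs⟩ := List.exists_cons_of_ne_nil hcsne
    rw [hcs]
    -- order facts about the candidate list
    have hpwcs : (j1 :: cs).Pairwise (· < ·) := by
      rw [← hcs]
      exact (PySem.List.pairwise_lt_pyRange_one 0 (optimalP.length : Int)).sublist
        List.filter_sublist
    have hpw' := List.pairwise_cons.mp hpwcs
    have hj1lt : ∀ x ∈ cs, (pvTrip optimalP j1).2.1 < x := by
      intro x hx; simpa [pvTrip] using hpw'.1 x hx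
    obtain ⟨hmem, hmin⟩ := pv_g_min optimalP cs (pvTrip optimalP j1) hpw'.2 hj1lt
    set r := cs.foldl (pvG optimalP) (pvTrip optimalP j1) with hr
    -- r is in the candidate triples, hence in drop m
    have hrmem : r ∈ ((pvT optimalP job0).drop m) := by
      apply hperm.mem_iff.mp
      rw [hcs]
      rcases hmem with h' | h'
      · rw [h']; simp
      · simp only [List.map_cons, List.mem_cons]; right; exact h'
    -- T[m] is the head of drop m and is key-minimal there
    have hdropcons : (pvT optimalP job0).drop m =
        (pvT optimalP job0)[m] :: (pvT optimalP job0).drop (m + 1) :=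
      List.drop_eq_getElem_cons h
    have hsortpw : ((pvT optimalP job0).drop m).Pairwise (fun a b => pvKey a ≤ pvKey b) :=
      (PySem.List.sorted_pairwise (pvElig optimalP job0) pvKey).sublist (List.drop_sublist m _)
    have hheadmin : ∀ q ∈ (pvT optimalP job0).drop m, pvKey ((pvT optimalP job0)[m]) ≤ pvKey q := by
      intro q hq
      rw [hdropcons] at hq
      rcases List.mem_cons.mp hq with rfl | hq'
      · exact le_refl _
      · rw [hdropcons] at hsortpw
        exact (List.pairwise_cons.mp hsortpw).1 q hq'
    have hTmdrop : (pvT optimalP job0)[m] ∈ (pvT optimalP job0).drop m := by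
      rw [hdropcons]
      exact List.mem_cons.mpr (Or.inl rfl)
    have hTm_mem_cands : (pvT optimalP job0)[m] ∈
        (pvTrip optimalP j1) :: cs.map (pvTrip optimalP) := by
      have := hperm.mem_iff.mpr hTmdrop
      rw [hcs] at this
      simpa using this
    have hle1 : pvKey r ≤ pvKey ((pvT optimalP job0)[m]) := hmin _ hTm_mem_cands
    have hle2 : pvKey ((pvT optimalP job0)[m]) ≤ pvKey r := hheadmin r hrmem
    have hkeq : pvKey r = pvKey ((pvT optimalP job0)[m]) := le_antisymm hle1 hle2
    have hreq : r = (pvT optimalP job0)[m] := by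
      have hr1 : r = pvTrip optimalP r.2.1 := by
        rcases hmem with h' | h'
        · rw [h']; rfl
        · rcases List.mem_map.mp h' with ⟨j, _, hj⟩; rw [← hj]; rfl
      have hT1 : (pvT optimalP job0)[m] = pvTrip optimalP ((pvT optimalP job0)[m]).2.1 :=
        pv_mem_T_trip (List.mem_of_mem_drop hTmdrop)
      have hk := hkeq
      simp only [pvKey] at hk
      have hk2 : (r.1, r.2.1) = (((pvT optimalP job0)[m]).1, ((pvT optimalP job0)[m]).2.1) := by
        exact_mod_cast congrArg ofLex hk
      have hv : r.2.1 = ((pvT optimalP job0)[m]).2.1 := congrArg Prod.snd hk2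
      rw [hr1, hv, ← hT1]
    show pvStOf (cs.foldl (pvG optimalP) (pvTrip optimalP j1)) =
      pvStOf ((pvT optimalP job0)[m])
    rw [← hr, hreq]
  · rw [dif_neg h]
    have hm' : m = (pvT optimalP job0).length := by omega
    have hdrop : (pvT optimalP job0).drop m = [] := by
      apply List.drop_eq_nil_of_le; omega
    rw [hdrop] at hperm
    have hcse : ((PySem.List.pyRange 0 (optimalP.length : Int) 1).filter
        (pvCand optimalP job0 (pvJlOf optimalP job0 m))) = [] :=
      List.map_eq_nil_iff.mp hperm.eq_nil
    rw [hcse]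

-- the outer loop advances one sorted triple per iteration (until exhausted)
theorem pv_outer (optimalP : List (Int × Int)) (job0 : List Int)
    (hlen : optimalP.length ≤ job0.length) (I : List Int) :
    ∀ m : Nat, m ≤ (pvT optimalP job0).length →
      I.foldl (fun st _i => pvBodyA optimalP job0 st)
        (pvBuyOf optimalP job0 m, pvJlOf optimalP job0 m) =
        (pvBuyOf optimalP job0 (min (m + I.length) (pvT optimalP job0).length),
          pvJlOf optimalP job0 (min (m + I.length) (pvT optimalP job0).length)) := by
  induction I with
  | nil =>
    intro m hm
    simp only [List.foldl_nil, List.length_nil, Nat.add_zero]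
    rw [Nat.min_eq_left hm]
  | cons i I ih =>
    intro m hm
    rw [List.foldl_cons]
    by_cases h : m < (pvT optimalP job0).length
    · have hbody : pvBodyA optimalP job0 (pvBuyOf optimalP job0 m, pvJlOf optimalP job0 m) =
          (pvBuyOf optimalP job0 (m + 1), pvJlOf optimalP job0 (m + 1)) := by
        unfold pvBodyA
        rw [show (pvBuyOf optimalP job0 m, pvJlOf optimalP job0 m).2 = pvJlOf optimalP job0 m from rfl,
          pv_inner_char optimalP job0 hlen m hm, dif_pos h]
        simp only [pvStOf]
        have htake : (pvT optimalP job0).take (m + 1) =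
            (pvT optimalP job0).take m ++ [(pvT optimalP job0)[m]] := by
          rw [List.take_succ, List.getElem?_eq_getElem h]; rfl
        simp only [pvBuyOf, pvJlOf, htake, List.map_append]
        rfl
      rw [hbody, ih (m + 1) (by omega)]
      have : m + 1 + I.length = m + (i :: I).length := by simp; omega
      rw [this]
    · have hm' : m = (pvT optimalP job0).length := by omega
      have hbody : pvBodyA optimalP job0 (pvBuyOf optimalP job0 m, pvJlOf optimalP job0 m) =
          (pvBuyOf optimalP job0 m, pvJlOf optimalP job0 m) := by
        unfold pvBodyA
        rw [show (pvBuyOf optimalP job0 m, pvJlOf optimalP job0 m).2 = pvJlOf optimalP job0 m from rfl,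
          pv_inner_char optimalP job0 hlen m hm, dif_neg h]
        rfl
      rw [hbody, ih m hm]
      have h1 : min (m + I.length) (pvT optimalP job0).length = (pvT optimalP job0).length := by omega
      have h2 : min (m + (i :: I).length) (pvT optimalP job0).length = (pvT optimalP job0).length := by
        simp; omega
      rw [h1, h2]

theorem pv_take_min (l : List (Int × Int × Int)) (a : Nat) :
    l.take (min a l.length) = l.take a := by
  rcases Nat.le_total a l.length with h | h
  · rw [Nat.min_eq_left h]
  · rw [Nat.min_eq_right h, List.take_of_length_le h, List.take_of_length_le (by omega)]

-- ===== VERDICT (by name: the statement is the Claim_ definition above) =====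
theorem intelligent_purchase_spec : Claim_equal_intelligent_purchase := by
  intro optimalP job _hdom hpre
  unfold Spec_intelligent_purchase intelligent_purchase intelligent_purchase_alt
  by_cases hk : job.2 ≤ 0
  · rw [PySem.List.pyRange_one_eq_nil hk]
    simp [hk]
  · have hk' : 0 < job.2 := by omega
    have hlen : optimalP.length ≤ job.1.length := by
      rcases hpre with h | h
      · omega
      · exact h
    simp only [if_neg hk]
    have h0 : (([], []) : List (Int × Int) × List Int) =
        (pvBuyOf optimalP job.1 0, pvJlOf optimalP job.1 0) := rfl
    rw [h0, pv_outer optimalP job.1 hlen _ 0 (Nat.zero_le _)]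
    rw [PySem.List.length_pyRange_one, Nat.zero_add]
    show pvBuyOf optimalP job.1 (min (job.2 - 0).toNat (pvT optimalP job.1).length) = _
    rw [pv_sorted2_eq]
    rw [PySem.List.slice_to _ (by omega)]
    show ((pvT optimalP job.1).take (min (job.2 - 0).toNat (pvT optimalP job.1).length)).map pvProj =
      ((pvT optimalP job.1).take job.2.toNat).map (fun t => (t.2.1, t.2.2))
    rw [pv_take_min]
    have : (job.2 - 0).toNat = job.2.toNat := by omega
    rw [this]
    rfl
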